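-- pv_equiv track=rewrite | github.com/THVKhang/ChatBot_Validex | _test_redteam.py | extract_intro
-- ===== SOURCE A (Python) =====
-- def extract_intro(draft):
--     """Extract text between # title and the first ## heading."""
--     lines = draft.split("\n")
--     intro_lines = []
--     past_title = False
--     for line in lines:
--         if line.startswith("# ") and not past_title:
--             past_title = True
--             continue
--         if past_title and line.startswith("## "):
--             break
--         if past_title:
--             intro_lines.append(line)
--     return " ".join(intro_lines).strip()
-- ===== SOURCE B (Python) =====
-- def extract_intro(draft):
--     """Extract text between # title and the first ## heading."""
--     lines = draft.split("\n")
--     i = next((k for k, line in enumerate(lines) if line.startswith("# ")), None)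
--     if i is None:
--         return ""
--     rest = lines[i + 1:]
--     j = next((k for k, line in enumerate(rest) if line.startswith("## ")), len(rest))
--     return " ".join(rest[:j]).strip()
-- ===== Notes on version B (the rewrite author's own statement) =====
-- stated objective: alternative
-- what changed: Replaces A's single flag-driven pass (past_title boolean with continue/break) by a find-boundaries-then-slice decomposition: locate the first '# ' line, then the first '## ' line after it, and slice the lines in between.
import Mathlib
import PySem

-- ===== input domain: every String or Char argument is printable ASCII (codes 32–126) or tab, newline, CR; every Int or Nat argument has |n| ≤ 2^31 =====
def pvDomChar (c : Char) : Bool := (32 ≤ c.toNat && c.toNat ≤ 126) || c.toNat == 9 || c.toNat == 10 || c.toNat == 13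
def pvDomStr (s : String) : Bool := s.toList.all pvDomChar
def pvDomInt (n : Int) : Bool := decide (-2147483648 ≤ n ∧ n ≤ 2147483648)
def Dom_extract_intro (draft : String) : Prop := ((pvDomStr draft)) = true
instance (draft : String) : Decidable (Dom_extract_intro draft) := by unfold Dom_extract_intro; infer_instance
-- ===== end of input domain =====

-- B replaces A's single flag-driven pass by a find-boundaries-then-slice decomposition (objective: alternative, same cost).

-- ===== PORT A =====
-- A's for-loop with `past_title`, `continue` and `break`, as structural recursion over the lines.
def pvLoopA (past : Bool) (acc : List String) : List String → List String
  | [] => acc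
  | l :: ls =>
    if PySem.Str.startswith l "# " && !past then pvLoopA true acc ls          -- past_title = True; continue
    else if past && PySem.Str.startswith l "## " then acc                      -- break
    else if past then pvLoopA past (acc ++ [l]) ls                             -- intro_lines.append(line)
    else pvLoopA past acc ls

-- draft.split("\n"): the separator "\n" is non-empty, so split? is always some; getD never fires.
def extract_intro (draft : String) : String :=
  let lines := (PySem.Str.split? draft "\n").getD []
  PySem.Str.strip (PySem.Str.join " " (pvLoopA false [] lines))

-- ===== PORT B =====
def extract_intro_alt (draft : String) : String :=
  let lines := (PySem.Str.split? draft "\n").getD []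
  match lines.findIdx? (fun l => PySem.Str.startswith l "# ") with
  | none => ""
  | some i =>
    let rest := lines.drop (i + 1)
    let j := (rest.findIdx? (fun l => PySem.Str.startswith l "## ")).getD rest.length
    PySem.Str.strip (PySem.Str.join " " (rest.take j))

-- ===== PRECONDITION & SPEC =====
def Spec_extract_intro (draft : String) (out : String) : Prop := out = extract_intro_alt draft
instance (draft : String) (out : String) : Decidable (Spec_extract_intro draft out) := by unfold Spec_extract_intro; infer_instance

-- ===== CLAIM (what is proved, stated in full; the proofs are below) =====
def Claim_equal_extract_intro : Prop := ∀ (draft : String), Dom_extract_intro draft → Spec_extract_intro draft (extract_intro draft)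

-- ===== LEMMAS AND PROOFS =====

-- Once past the title, A's loop appends lines until the first "## " line: that is B's take of the findIdx?.
theorem pvLoopA_true (lines : List String) : ∀ acc,
    pvLoopA true acc lines =
      acc ++ lines.take (((lines.findIdx? (fun l => PySem.Str.startswith l "## ")).getD lines.length)) := by
  induction lines with
  | nil => intro acc; simp only [pvLoopA, List.findIdx?_nil, List.length_nil, Option.getD_none,
      List.take_nil, List.append_nil]
  | cons l ls ih =>
    intro acc
    simp only [pvLoopA, Bool.not_true, Bool.and_false, Bool.false_eq_true, if_false,
      Bool.true_and, List.findIdx?_cons, List.length_cons]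
    by_cases h : PySem.Str.startswith l "## " = true
    · rw [if_pos h, if_pos h]
      simp only [Option.getD_some, List.take_zero, List.append_nil]
    · rw [if_neg h, if_neg h, if_pos trivial, ih]
      cases hf : ls.findIdx? (fun l => PySem.Str.startswith l "## ") with
      | none =>
        simp only [Option.map_none, Option.getD_none, List.take_succ_cons,
          List.append_assoc, List.singleton_append]
      | some j =>
        simp only [Option.map_some, Option.getD_some, List.take_succ_cons,
          List.append_assoc, List.singleton_append]

-- Before the title, A's loop skips lines until the first "# " line, then switches to the past-title phase.
theorem pvLoopA_false (lines : List String) :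
    pvLoopA false [] lines =
      match lines.findIdx? (fun l => PySem.Str.startswith l "# ") with
      | none => []
      | some i =>
        let rest := lines.drop (i + 1)
        rest.take ((rest.findIdx? (fun l => PySem.Str.startswith l "## ")).getD rest.length) := by
  induction lines with
  | nil => simp only [pvLoopA, List.findIdx?_nil]
  | cons l ls ih =>
    simp only [pvLoopA, Bool.not_false, Bool.and_true, Bool.false_and, Bool.false_eq_true,
      if_false, List.findIdx?_cons]
    by_cases h : PySem.Str.startswith l "# " = true
    · rw [if_pos h, if_pos h, pvLoopA_true, List.nil_append]
      simp only [List.drop_succ_cons, List.drop_zero]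
    · rw [if_neg h, if_neg h, ih]
      cases hf : ls.findIdx? (fun l => PySem.Str.startswith l "# ") with
      | none => simp only [Option.map_none]
      | some i => simp only [Option.map_some, List.drop_succ_cons]

-- ===== VERDICT (by name: the statement is the Claim_ definition above) =====
theorem extract_intro_spec : Claim_equal_extract_intro := by
  intro draft _
  unfold Spec_extract_intro extract_intro extract_intro_alt
  simp only [pvLoopA_false]
  cases hf : ((PySem.Str.split? draft "\n").getD []).findIdx? (fun l => PySem.Str.startswith l "# ") with
  | none => exact (by decide : PySem.Str.strip (PySem.Str.join " " ([] : List String)) = "")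
  | some i => rfl
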